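-- pv_equiv track=rewrite | github.com/ColeZenk/SD403_TrailCamera_NDSU | sim/lossy_compression.py | iwht_2d
-- ===== SOURCE A (Python) =====
-- def fwht(data):
--     x = data[:]
--     N = len(x)
--     stride = 1
--     while stride < N:
--         for i in range(0, N, stride << 1):
--             for j in range(stride):
--                 a = x[i + j]
--                 b = x[i + j + stride]
--                 x[i + j]          = a + b
--                 x[i + j + stride] = a - b
--         stride <<= 1
--     return x
--
-- def ifwht(data):
--     x = fwht(data)
--     N = len(x)
--     return [v // N for v in x]
--
-- def iwht_2d(coeffs, w, h):
--     result = [row[:] for row in coeffs]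
--     for x in range(w):
--         col = [result[y][x] for y in range(h)]
--         col = ifwht(col)
--         for y in range(h):
--             result[y][x] = col[y]
--     for y in range(h):
--         result[y] = ifwht(result[y])
--     return result
-- ===== SOURCE B (Python) =====
-- def _fwht_rec(x):
--     n = len(x)
--     if n <= 1:
--         return list(x)
--     half = n // 2
--     lo = _fwht_rec(x[:half])
--     hi = _fwht_rec(x[half:])
--     return [a + b for a, b in zip(lo, hi)] + [a - b for a, b in zip(lo, hi)]
--
-- def _ifwht(data):
--     y = _fwht_rec(data)
--     n = len(y)
--     return [v // n for v in y]
--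
-- def iwht_2d(coeffs, w, h):
--     result = [row[:] for row in coeffs]
--     for x in range(w):
--         col = _ifwht([result[y][x] for y in range(h)])
--         for y in range(h):
--             result[y][x] = col[y]
--     for y in range(h):
--         result[y] = _ifwht(result[y])
--     return result
-- ===== Notes on version B (the rewrite author's own statement) =====
-- stated objective: alternative
-- what changed: The 1D Walsh-Hadamard transform is rewritten as a recursive divide-and-conquer on contiguous halves (recurse on each half, then return lo+hi concatenated with lo-hi) instead of A's in-place iterative stride-doubling butterfly; the 2D driver (columns then rows, each divided by the length) is unchanged.
import Mathlib
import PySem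

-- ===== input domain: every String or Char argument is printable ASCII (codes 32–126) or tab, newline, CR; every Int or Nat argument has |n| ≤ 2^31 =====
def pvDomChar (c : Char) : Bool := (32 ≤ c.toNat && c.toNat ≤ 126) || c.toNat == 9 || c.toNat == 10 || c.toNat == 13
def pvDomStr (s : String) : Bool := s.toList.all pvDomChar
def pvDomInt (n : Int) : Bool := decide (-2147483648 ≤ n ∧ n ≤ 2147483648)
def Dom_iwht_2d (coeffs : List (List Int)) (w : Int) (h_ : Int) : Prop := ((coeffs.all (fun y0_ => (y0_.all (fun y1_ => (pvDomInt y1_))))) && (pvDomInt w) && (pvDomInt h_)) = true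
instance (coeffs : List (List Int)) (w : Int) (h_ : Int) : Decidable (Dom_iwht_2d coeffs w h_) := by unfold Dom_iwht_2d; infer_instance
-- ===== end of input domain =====

-- B replaces A's in-place iterative stride-doubling Walsh-Hadamard butterfly by a recursive
-- divide-and-conquer transform on contiguous halves (objective: alternative, no speed claim).

-- ===== PORT A =====
-- Python's inner 'for j in range(stride)' loop, generalized by a count parameter
-- (the port always calls it with cnt = s); indices are nonnegative, so Nat index
-- lists are an exact port of Python's range here.
def pvInnerAux (s i cnt : Nat) (x : List Int) : List Int :=
  (List.range cnt).foldl
    (fun x j =>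
      let a := x.getD (i + j) 0
      let b := x.getD (i + j + s) 0
      (x.set (i + j) (a + b)).set (i + j + s) (a - b)) x

-- 'for i in range(0, N, stride << 1)': Python range(0, N, 2s) is the Nat index list
-- range' 0 ⌈N/2s⌉ (2s); exact since N ≥ 0 and 2s > 0 whenever the loop runs.
def pvStage (N s : Nat) (x : List Int) : List Int :=
  (List.range' 0 ((N + (2 * s - 1)) / (2 * s)) (2 * s)).foldl (fun x i => pvInnerAux s i s x) x

-- 'while stride < N': stride doubles each pass (0 < s is an unreachable totality guard;
-- Python's stride starts at 1 and only doubles).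
def pvFwhtLoop (N s : Nat) (x : List Int) : List Int :=
  if h : 0 < s ∧ s < N then pvFwhtLoop N (2 * s) (pvStage N s x) else x
  termination_by N - s
  decreasing_by omega

def pvFwht (data : List Int) : List Int := pvFwhtLoop data.length 1 data

def pvIfwht (data : List Int) : List Int :=
  let x := pvFwht data
  x.map (fun v => PySem.Int.floordiv v (x.length : Int))

-- col = [result[y][x] for y in range(h)]
def pvColOf (r : List (List Int)) (hN x : Nat) : List Int :=
  (List.range hN).map (fun y => (r.getD y []).getD x 0)

-- for y in range(h): result[y][x] = col[y]
def pvSetCol (r : List (List Int)) (hN x : Nat) (col : List Int) : List (List Int) :=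
  (List.range hN).foldl (fun r y => r.set y ((r.getD y []).set x (col.getD y 0))) r

def iwht_2d (coeffs : List (List Int)) (w : Int) (h_ : Int) : List (List Int) :=
  let result := coeffs.map (fun row => row)   -- result = [row[:] for row in coeffs]
  let result := (List.range w.toNat).foldl
      (fun r x => pvSetCol r h_.toNat x (pvIfwht (pvColOf r h_.toNat x))) result
  (List.range h_.toNat).foldl (fun r y => r.set y (pvIfwht (r.getD y []))) result

-- ===== PORT B =====
def pvFwhtRec (x : List Int) : List Int :=
  if x.length ≤ 1 then x
  else
    let half := x.length / 2
    let lo := pvFwhtRec (x.take half)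
    let hi := pvFwhtRec (x.drop half)
    (List.zipWith (· + ·) lo hi) ++ (List.zipWith (· - ·) lo hi)
  termination_by x.length
  decreasing_by
    · simp; omega
    · simp; omega

def pvIfwhtRec (data : List Int) : List Int :=
  let y := pvFwhtRec data
  y.map (fun v => PySem.Int.floordiv v (y.length : Int))

def iwht_2d_alt (coeffs : List (List Int)) (w : Int) (h_ : Int) : List (List Int) :=
  let result := coeffs.map (fun row => row)
  let result := (List.range w.toNat).foldl
      (fun r x => pvSetCol r h_.toNat x (pvIfwhtRec (pvColOf r h_.toNat x))) result
  (List.range h_.toNat).foldl (fun r y => r.set y (pvIfwhtRec (r.getD y []))) result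

-- ===== PRECONDITION & SPEC =====
def pvPow2Ok (n : Nat) : Bool := n == 0 || (n &&& (n - 1)) == 0

-- Pre_ excludes exactly the inputs on which A raises IndexError: with h > 0 it needs
-- h ≤ len(coeffs) and every one of the first h rows of power-of-two (or ≤ 1) length,
-- and when additionally w > 0 also h itself a power of two and w ≤ each such row's length.
def Pre_iwht_2d (coeffs : List (List Int)) (w : Int) (h_ : Int) : Prop :=
  0 < h_ →
    (h_ ≤ (coeffs.length : Int)
     ∧ (∀ row ∈ coeffs.take h_.toNat, pvPow2Ok row.length = true)
     ∧ (0 < w → pvPow2Ok h_.toNat = true ∧ ∀ row ∈ coeffs.take h_.toNat, w ≤ (row.length : Int)))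

instance (coeffs : List (List Int)) (w : Int) (h_ : Int) : Decidable (Pre_iwht_2d coeffs w h_) := by
  unfold Pre_iwht_2d; infer_instance

def pvWitness_iwht_2d : List (List Int) × Int × Int := ([[1, 2], [3, 4]], 2, 2)

def Spec_iwht_2d (coeffs : List (List Int)) (w : Int) (h_ : Int) (out : List (List Int)) : Prop := out = iwht_2d_alt coeffs w h_
instance (coeffs : List (List Int)) (w : Int) (h_ : Int) (out : List (List Int)) : Decidable (Spec_iwht_2d coeffs w h_ out) := by unfold Spec_iwht_2d; infer_instance

-- ===== CLAIM (what is proved, stated in full; the proofs are below) =====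
def Claim_equal_iwht_2d : Prop := ∀ (coeffs : List (List Int)) (w : Int) (h_ : Int), Dom_iwht_2d coeffs w h_ → Pre_iwht_2d coeffs w h_ → Spec_iwht_2d coeffs w h_ (iwht_2d coeffs w h_)

-- ===== LEMMAS AND PROOFS =====

-- generic foldl congruence under an invariant
theorem pvFoldlCongP {α σ : Type} (P : σ → Prop) (f g : σ → α → σ) :
    ∀ (l : List α) (s : σ), P s → (∀ s a, a ∈ l → P s → P (f s a)) →
      (∀ s a, a ∈ l → P s → f s a = g s a) →
      l.foldl f s = l.foldl g s ∧ P (l.foldl f s) := by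
  intro l
  induction l with
  | nil => intro s hP _ _; exact ⟨rfl, hP⟩
  | cons a l ih =>
    intro s hP hpres hag
    simp only [List.foldl_cons]
    have h1 : P (f s a) := hpres s a (by simp) hP
    have h2 : f s a = g s a := hag s a (by simp) hP
    have h3 := ih (f s a) h1 (fun s b hb => hpres s b (by simp [hb]))
      (fun s b hb => hag s b (by simp [hb]))
    exact ⟨by rw [← h2]; exact h3.1, h3.2⟩

theorem pvFoldlP {α σ : Type} (P : σ → Prop) (f : σ → α → σ) (l : List α) (s : σ)
    (hP : P s) (hpres : ∀ s a, a ∈ l → P s → P (f s a)) : P (l.foldl f s) :=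
  (pvFoldlCongP P f f l s hP hpres (fun _ _ _ _ => rfl)).2

theorem pvInnerAux_length (s i cnt : Nat) (x : List Int) :
    (pvInnerAux s i cnt x).length = x.length :=
  pvFoldlP (fun y => y.length = x.length) _ _ x rfl (by intro y j _ h; simpa using h)

theorem pvStage_length (N s : Nat) (x : List Int) : (pvStage N s x).length = x.length :=
  pvFoldlP (fun y => y.length = x.length) _ _ x rfl
    (by intro y i _ h; rw [pvInnerAux_length]; exact h)

theorem pvFwhtLoop_length (N s : Nat) (x : List Int) : (pvFwhtLoop N s x).length = x.length := by
  induction s, x using pvFwhtLoop.induct N with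
  | case1 s x h ih => rw [pvFwhtLoop, dif_pos h, ih, pvStage_length]
  | case2 s x h => rw [pvFwhtLoop, dif_neg h]

theorem pvGetD_set_ne {α : Type} (l : List α) (k p : Nat) (v d : α) (h : k ≠ p) :
    (l.set k v).getD p d = l.getD p d := by
  simp [List.getD_eq_getElem?_getD, List.getElem?_set_ne h]

theorem pvGetD_set_self {α : Type} (l : List α) (k : Nat) (v d : α) (h : k < l.length) :
    (l.set k v).getD k d = v := by
  simp [List.getD_eq_getElem?_getD, List.getElem?_set_self h]

theorem pvInnerAux_getD : ∀ (cnt s i : Nat) (x : List Int), cnt ≤ s → i + s + cnt ≤ x.length →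
    ∀ p : Nat,
    (pvInnerAux s i cnt x).getD p 0 =
      if i ≤ p ∧ p < i + cnt then x.getD p 0 + x.getD (p + s) 0
      else if i + s ≤ p ∧ p < i + s + cnt then x.getD (p - s) 0 - x.getD p 0
      else x.getD p 0 := by
  intro cnt
  induction cnt with
  | zero =>
    intro s i x _ _ p
    simp only [pvInnerAux, List.range_zero, List.foldl_nil]
    split_ifs with h1 h2
    · exfalso; omega
    · exfalso; omega
    · rfl
  | succ n ih =>
    intro s i x hcnt hlen p
    have hstep : pvInnerAux s i (n + 1) x =
        (let y := pvInnerAux s i n x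
         let a := y.getD (i + n) 0
         let b := y.getD (i + n + s) 0
         (y.set (i + n) (a + b)).set (i + n + s) (a - b)) := by
      simp only [pvInnerAux, List.range_succ, List.foldl_append, List.foldl_cons, List.foldl_nil]
    rw [hstep]
    have hn : n ≤ s := by omega
    have hlen' : i + s + n ≤ x.length := by omega
    have hy := ih s i x hn hlen'
    have hlenY : (pvInnerAux s i n x).length = x.length := pvInnerAux_length ..
    have ha : (pvInnerAux s i n x).getD (i + n) 0 = x.getD (i + n) 0 := by
      rw [hy (i + n)]; split_ifs with h1 h2 <;> first | rfl | omega
    have hb : (pvInnerAux s i n x).getD (i + n + s) 0 = x.getD (i + n + s) 0 := by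
      rw [hy (i + n + s)]; split_ifs with h1 h2 <;> first | rfl | omega
    simp only [ha, hb]
    by_cases hps : p = i + n + s
    · subst hps
      rw [pvGetD_set_self _ _ _ _ (by simp [hlenY]; omega)]
      have e1 : i + n + s - s = i + n := by omega
      split_ifs with h1 h2
      · exfalso; omega
      · rw [e1]
      · exfalso; omega
    · rw [pvGetD_set_ne _ _ _ _ _ (by omega)]
      by_cases hpn : p = i + n
      · subst hpn
        rw [pvGetD_set_self _ _ _ _ (by rw [hlenY]; omega)]
        split_ifs with h1 h2
        · rfl
        · exfalso; omega
        · exfalso; omega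
      · rw [pvGetD_set_ne _ _ _ _ _ (by omega)]
        rw [hy p]
        split_ifs with h1 h2 h3 h4 h5 <;> first | rfl | (exfalso; omega)

theorem pvInnerAux_combine (s : Nat) (xs ys : List Int) (hx : xs.length = s) (hy : ys.length = s) :
    pvInnerAux s 0 s (xs ++ ys) =
      List.zipWith (· + ·) xs ys ++ List.zipWith (· - ·) xs ys := by
  apply List.ext_getElem
  · simp [pvInnerAux_length, hx, hy]
  · intro p h1 h2
    have hlen2 : (xs ++ ys).length = s + s := by simp [hx, hy]
    have hp : p < s + s := by simpa [pvInnerAux_length, hlen2] using h1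
    have hchar := pvInnerAux_getD s s 0 (xs ++ ys) le_rfl (by omega) p
    have hLHS : (pvInnerAux s 0 s (xs ++ ys))[p] = (pvInnerAux s 0 s (xs ++ ys)).getD p 0 :=
      (List.getD_eq_getElem _ _ _).symm
    rw [hLHS, hchar]
    have hzl : (List.zipWith (· + ·) xs ys).length = s := by simp [hx, hy]
    by_cases hps : p < s
    · rw [if_pos (by omega)]
      rw [List.getD_append _ _ _ _ (by omega), List.getD_append_right _ _ _ _ (by omega)]
      have e1 : p + s - xs.length = p := by omega
      rw [e1]
      rw [List.getElem_append_left (by omega)]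
      rw [List.getElem_zipWith]
      rw [List.getD_eq_getElem _ _ (by omega), List.getD_eq_getElem _ _ (by omega)]
    · rw [if_neg (by omega), if_pos (by omega)]
      rw [List.getD_append _ _ _ _ (by omega), List.getD_append_right _ _ _ _ (by omega)]
      have e1 : p - xs.length = p - s := by omega
      rw [e1]
      rw [List.getElem_append_right (by omega)]
      rw [List.getElem_zipWith]
      have e2 : p - (List.zipWith (· + ·) xs ys).length = p - s := by omega
      simp only [e2]
      rw [List.getD_eq_getElem _ _ (by omega), List.getD_eq_getElem _ _ (by omega)]

theorem pvInnerAux_append_left : ∀ (cnt s i : Nat) (xs ys : List Int), i + s + cnt ≤ xs.length →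
    pvInnerAux s i cnt (xs ++ ys) = pvInnerAux s i cnt xs ++ ys := by
  intro cnt
  induction cnt with
  | zero => intro s i xs ys _; simp [pvInnerAux]
  | succ n ih =>
    intro s i xs ys hlen
    have hstep : ∀ z : List Int, pvInnerAux s i (n + 1) z =
        ((pvInnerAux s i n z).set (i + n)
            ((pvInnerAux s i n z).getD (i + n) 0 + (pvInnerAux s i n z).getD (i + n + s) 0)).set
          (i + n + s)
          ((pvInnerAux s i n z).getD (i + n) 0 - (pvInnerAux s i n z).getD (i + n + s) 0) := by
      intro z
      simp only [pvInnerAux, List.range_succ, List.foldl_append, List.foldl_cons, List.foldl_nil]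
    rw [hstep, hstep]
    rw [ih s i xs ys (by omega)]
    have hlenY : (pvInnerAux s i n xs).length = xs.length := pvInnerAux_length ..
    rw [List.getD_append _ _ _ _ (by omega), List.getD_append _ _ _ _ (by omega)]
    rw [List.set_append_left _ _ (by simp [hlenY]; omega)]
    rw [List.set_append_left _ _ (by simp [hlenY]; omega)]

theorem pvGetD_append_right_off {α : Type} (xs ys : List α) (k : Nat) (d : α) :
    (xs ++ ys).getD (xs.length + k) d = ys.getD k d := by
  rw [List.getD_append_right _ _ _ _ (by omega)]
  congr 1
  omega

theorem pvInnerAux_append_right : ∀ (cnt s i : Nat) (xs ys : List Int), i + s + cnt ≤ ys.length →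
    pvInnerAux s (xs.length + i) cnt (xs ++ ys) = xs ++ pvInnerAux s i cnt ys := by
  intro cnt
  induction cnt with
  | zero => intro s i xs ys _; simp [pvInnerAux]
  | succ n ih =>
    intro s i xs ys hlen
    have hstep : ∀ (j : Nat) (z : List Int), pvInnerAux s j (n + 1) z =
        ((pvInnerAux s j n z).set (j + n)
            ((pvInnerAux s j n z).getD (j + n) 0 + (pvInnerAux s j n z).getD (j + n + s) 0)).set
          (j + n + s)
          ((pvInnerAux s j n z).getD (j + n) 0 - (pvInnerAux s j n z).getD (j + n + s) 0) := by
      intro j z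
      simp only [pvInnerAux, List.range_succ, List.foldl_append, List.foldl_cons, List.foldl_nil]
    rw [hstep, hstep]
    rw [ih s i xs ys (by omega)]
    have hlenY : (pvInnerAux s i n ys).length = ys.length := pvInnerAux_length ..
    have e1 : xs.length + i + n = xs.length + (i + n) := by omega
    have e2 : xs.length + (i + n) + s = xs.length + (i + n + s) := by omega
    rw [e1, e2]
    rw [pvGetD_append_right_off, pvGetD_append_right_off]
    rw [List.set_append_right _ _ (by omega)]
    have e3 : xs.length + (i + n) - xs.length = i + n := by omega
    rw [e3]
    rw [List.set_append_right _ _ (by omega)]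
    have e4 : xs.length + (i + n + s) - xs.length = i + n + s := by omega
    rw [e4]

theorem pvFoldStage_length (s : Nat) (l : List Nat) (z : List Int) :
    (l.foldl (fun x i => pvInnerAux s i s x) z).length = z.length :=
  pvFoldlP (fun y => y.length = z.length) _ l z rfl
    (by intro y i _ h; rw [pvInnerAux_length]; exact h)

theorem pvFoldInner_left (s : Nat) (ys : List Int) (m : Nat) :
    ∀ (l : List Nat), (∀ a ∈ l, a + s + s ≤ m) → ∀ u : List Int, u.length = m →
      l.foldl (fun x i => pvInnerAux s i s x) (u ++ ys) =
        l.foldl (fun x i => pvInnerAux s i s x) u ++ ys := by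
  intro l
  induction l with
  | nil => intro _ u _; simp
  | cons a l ih =>
    intro hb u hu
    simp only [List.foldl_cons]
    rw [pvInnerAux_append_left s s a u ys (by have := hb a (by simp); omega)]
    exact ih (fun b hbm => hb b (by simp [hbm])) (pvInnerAux s a s u)
      (by rw [pvInnerAux_length]; exact hu)

theorem pvFoldInner_right (s : Nat) (xs : List Int) (m : Nat) :
    ∀ (l : List Nat), (∀ a ∈ l, a + s + s ≤ m) → ∀ v : List Int, v.length = m →
      (l.map (fun t => xs.length + t)).foldl (fun x i => pvInnerAux s i s x) (xs ++ v) =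
        xs ++ l.foldl (fun x i => pvInnerAux s i s x) v := by
  intro l
  induction l with
  | nil => intro _ v _; simp
  | cons a l ih =>
    intro hb v hv
    simp only [List.map_cons, List.foldl_cons]
    rw [pvInnerAux_append_right s s a xs v (by have := hb a (by simp); omega)]
    exact ih (fun b hbm => hb b (by simp [hbm])) (pvInnerAux s a s v)
      (by rw [pvInnerAux_length]; exact hv)

theorem pvStage_append (s m : Nat) (hs : 0 < s) (hdvd : 2 * s ∣ m) (xs ys : List Int)
    (hx : xs.length = m) (hy : ys.length = m) :
    pvStage (2 * m) s (xs ++ ys) = pvStage m s xs ++ pvStage m s ys := by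
  obtain ⟨q, hq⟩ := hdvd
  have hs2 : 0 < 2 * s := by omega
  have hc1 : (m + (2 * s - 1)) / (2 * s) = q := by
    rw [hq, Nat.mul_add_div hs2, Nat.div_eq_of_lt (by omega)]
    omega
  have hc2 : (2 * m + (2 * s - 1)) / (2 * s) = q + q := by
    have e : 2 * m = 2 * s * (q + q) := by rw [hq]; ring
    rw [e, Nat.mul_add_div hs2, Nat.div_eq_of_lt (by omega)]
    omega
  unfold pvStage
  rw [hc1, hc2]
  have hsplit : List.range' 0 (q + q) (2 * s) =
      List.range' 0 q (2 * s) ++ List.range' (2 * s * q) q (2 * s) := by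
    rw [← List.range'_append]
    simp
  rw [hsplit, List.foldl_append]
  have hbound : ∀ a ∈ List.range' 0 q (2 * s), a + s + s ≤ m := by
    intro a ha
    rw [List.mem_range'] at ha
    obtain ⟨t, ht, rfl⟩ := ha
    rw [hq]
    calc 0 + 2 * s * t + s + s = 2 * s * (t + 1) := by ring
      _ ≤ 2 * s * q := Nat.mul_le_mul_left _ (by omega)
  rw [pvFoldInner_left s ys m _ hbound xs hx]
  have hu : ((List.range' 0 q (2 * s)).foldl (fun x i => pvInnerAux s i s x) xs).length = m :=
    by rw [pvFoldStage_length, hx]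
  have hmap : List.range' (2 * s * q) q (2 * s) =
      (List.range' 0 q (2 * s)).map
        (fun t => ((List.range' 0 q (2 * s)).foldl (fun x i => pvInnerAux s i s x) xs).length + t) := by
    rw [List.map_add_range']
    rw [hu, hq]
    norm_num
  rw [hmap, pvFoldInner_right s _ m _ hbound ys hy]

theorem pvLoop_split : ∀ (d j : Nat) (xs ys : List Int),
    xs.length = 2 ^ (j + d) → ys.length = 2 ^ (j + d) →
    pvFwhtLoop (2 ^ (j + d + 1)) (2 ^ j) (xs ++ ys) =
      List.zipWith (· + ·) (pvFwhtLoop (2 ^ (j + d)) (2 ^ j) xs) (pvFwhtLoop (2 ^ (j + d)) (2 ^ j) ys)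
      ++ List.zipWith (· - ·) (pvFwhtLoop (2 ^ (j + d)) (2 ^ j) xs) (pvFwhtLoop (2 ^ (j + d)) (2 ^ j) ys) := by
  intro d
  induction d with
  | zero =>
    intro j xs ys hx hy
    simp only [Nat.add_zero] at hx hy ⊢
    have hX : 0 < (2:Nat) ^ j := Nat.two_pow_pos j
    have hX1 : 0 < (2:Nat) ^ (j + 1) := Nat.two_pow_pos (j + 1)
    have h2 : 2 * 2 ^ j = 2 ^ (j + 1) := by ring
    rw [pvFwhtLoop, dif_pos ⟨hX, by have := Nat.pow_lt_pow_right (a := 2) (by norm_num) (show j < j + 1 by omega); omega⟩]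
    rw [pvFwhtLoop, dif_neg (by omega)]
    unfold pvStage
    rw [h2]
    have hcount : (2 ^ (j + 1) + (2 ^ (j + 1) - 1)) / 2 ^ (j + 1) = 1 := by
      have e : 2 ^ (j + 1) + (2 ^ (j + 1) - 1) = 2 ^ (j + 1) * 1 + (2 ^ (j + 1) - 1) := by omega
      rw [e, Nat.mul_add_div hX1, Nat.div_eq_of_lt (by omega)]
    rw [hcount]
    rw [List.range'_one]
    simp only [List.foldl_cons, List.foldl_nil]
    rw [pvFwhtLoop, dif_neg (by omega), pvFwhtLoop, dif_neg (by omega)]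
    exact pvInnerAux_combine (2 ^ j) xs ys hx hy
  | succ d ih =>
    intro j xs ys hx hy
    have hX : 0 < (2:Nat) ^ j := Nat.two_pow_pos j
    have hlt1 : (2:Nat) ^ j < 2 ^ (j + (d + 1) + 1) :=
      Nat.pow_lt_pow_right (by norm_num) (by omega)
    have hlt2 : (2:Nat) ^ j < 2 ^ (j + (d + 1)) :=
      Nat.pow_lt_pow_right (by norm_num) (by omega)
    have hm2 : 2 ^ (j + (d + 1) + 1) = 2 * 2 ^ (j + (d + 1)) := by ring
    rw [pvFwhtLoop, dif_pos ⟨hX, hlt1⟩]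
    rw [hm2]
    have hdvd : 2 * 2 ^ j ∣ 2 ^ (j + (d + 1)) := by
      have : (2:Nat) * 2 ^ j = 2 ^ (j + 1) := by ring
      rw [this]
      exact pow_dvd_pow 2 (by omega)
    rw [pvStage_append (2 ^ j) (2 ^ (j + (d + 1))) hX hdvd xs ys hx hy]
    have h2s : 2 * 2 ^ j = 2 ^ (j + 1) := by ring
    rw [h2s]
    have hex1 : j + (d + 1) = (j + 1) + d := by omega
    rw [hex1]
    have hm3 : 2 * 2 ^ ((j + 1) + d) = 2 ^ ((j + 1) + d + 1) := by ring
    rw [hm3]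
    rw [ih (j + 1) (pvStage (2 ^ ((j + 1) + d)) (2 ^ j) xs) (pvStage (2 ^ ((j + 1) + d)) (2 ^ j) ys)
      (by rw [pvStage_length, hx, hex1]) (by rw [pvStage_length, hy, hex1])]
    have hstep : ∀ z : List Int, pvFwhtLoop (2 ^ ((j + 1) + d)) (2 ^ j) z =
        pvFwhtLoop (2 ^ ((j + 1) + d)) (2 ^ (j + 1)) (pvStage (2 ^ ((j + 1) + d)) (2 ^ j) z) := by
      intro z
      conv_lhs => rw [pvFwhtLoop]
      rw [dif_pos ⟨hX, by rw [← hex1]; exact hlt2⟩, h2s]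
    rw [hstep xs, hstep ys]

theorem pvFwht_eq_pow : ∀ (k : Nat) (x : List Int), x.length = 2 ^ k → pvFwht x = pvFwhtRec x := by
  intro k
  induction k with
  | zero =>
    intro x hx
    rw [pvFwht, hx, pvFwhtLoop, dif_neg (by omega), pvFwhtRec, if_pos (by omega)]
  | succ k ih =>
    intro x hx
    have h2 : (2:Nat) ^ (k + 1) = 2 * 2 ^ k := by ring
    have hge : 2 ≤ x.length := by
      have := Nat.two_pow_pos k
      omega
    have hxs : (x.take (2 ^ k)).length = 2 ^ k := by
      simp [List.length_take]
      omega
    have hys : (x.drop (2 ^ k)).length = 2 ^ k := by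
      simp [List.length_drop]
      omega
    have hsplit : x = x.take (2 ^ k) ++ x.drop (2 ^ k) := (List.take_append_drop _ x).symm
    have hL : pvFwht x =
        List.zipWith (· + ·) (pvFwht (x.take (2 ^ k))) (pvFwht (x.drop (2 ^ k)))
        ++ List.zipWith (· - ·) (pvFwht (x.take (2 ^ k))) (pvFwht (x.drop (2 ^ k))) := by
      have hsp := pvLoop_split k 0 (x.take (2 ^ k)) (x.drop (2 ^ k))
        (by simpa using hxs) (by simpa using hys)
      simp only [Nat.zero_add, pow_zero] at hsp
      rw [pvFwht]
      conv_lhs => rw [hsplit]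
      rw [show (x.take (2 ^ k) ++ x.drop (2 ^ k)).length = 2 ^ (k + 1) from by
        rw [List.length_append, hxs, hys, h2]; omega]
      rw [hsp]
      simp only [pvFwht, hxs, hys]
    rw [hL]
    conv_rhs => rw [pvFwhtRec]
    rw [if_neg (by omega)]
    have ehalf : x.length / 2 = 2 ^ k := by omega
    simp only [ehalf]
    rw [ih _ hxs, ih _ hys]

theorem pvPow2Ok_spec : ∀ n : Nat, pvPow2Ok n = true → n = 0 ∨ ∃ k, n = 2 ^ k := by
  intro n h
  by_cases h0 : n = 0
  · exact Or.inl h0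
  · refine Or.inr ?_
    rw [pvPow2Ok] at h
    simp only [Bool.or_eq_true, beq_iff_eq] at h
    rcases h with h | h
    · exact absurd h h0
    · exact (Nat.and_sub_one_eq_zero_iff_isPowerOfTwo h0).mp h

theorem pvFwht_eq_ok (x : List Int) (h : pvPow2Ok x.length = true) : pvFwht x = pvFwhtRec x := by
  rcases pvPow2Ok_spec _ h with h0 | ⟨k, hk⟩
  · have hx : x = [] := List.length_eq_zero_iff.mp h0
    subst hx
    rw [pvFwht, pvFwhtLoop, pvFwhtRec]
    simp
  · exact pvFwht_eq_pow k x hk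

theorem pvIfwht_eq (x : List Int) (h : pvPow2Ok x.length = true) : pvIfwht x = pvIfwhtRec x := by
  unfold pvIfwht pvIfwhtRec
  rw [pvFwht_eq_ok x h]

theorem pvIfwht_length (x : List Int) : (pvIfwht x).length = x.length := by
  unfold pvIfwht
  simp [pvFwhtLoop_length, pvFwht]

theorem pvSetRow_P (coeffs r : List (List Int)) (y : Nat) (row : List Int)
    (h1 : r.length = coeffs.length)
    (h2 : ∀ p, (r.getD p []).length = (coeffs.getD p []).length)
    (hrowlen : row.length = (coeffs.getD y []).length) :
    (r.set y row).length = coeffs.length ∧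
      ∀ p, ((r.set y row).getD p []).length = (coeffs.getD p []).length := by
  constructor
  · simp [h1]
  · intro p
    by_cases hpy : y = p
    · subst hpy
      by_cases hylt : y < r.length
      · rw [pvGetD_set_self _ _ _ _ hylt]; exact hrowlen
      · rw [List.set_eq_of_length_le (by omega)]; exact h2 y
    · rw [pvGetD_set_ne _ _ _ _ _ hpy]; exact h2 p

theorem pvSetCol_P (coeffs r : List (List Int)) (H xi : Nat) (col : List Int)
    (h1 : r.length = coeffs.length)
    (h2 : ∀ p, (r.getD p []).length = (coeffs.getD p []).length) :
    (pvSetCol r H xi col).length = coeffs.length ∧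
      ∀ p, ((pvSetCol r H xi col).getD p []).length = (coeffs.getD p []).length := by
  exact pvFoldlP
    (fun r => r.length = coeffs.length ∧ ∀ p, (r.getD p []).length = (coeffs.getD p []).length)
    _ (List.range H) r ⟨h1, h2⟩
    (by
      intro r' y _ hP'
      exact pvSetRow_P coeffs r' y ((r'.getD y []).set xi (col.getD y 0)) hP'.1 hP'.2
        (by rw [List.length_set]; exact hP'.2 y))

theorem pvColOf_length (r : List (List Int)) (H x : Nat) : (pvColOf r H x).length = H := by
  simp [pvColOf]

theorem pvMemTake (coeffs : List (List Int)) (H y : Nat) (hy : y < H) (hle : H ≤ coeffs.length) :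
    coeffs.getD y [] ∈ coeffs.take H := by
  have hylen : y < coeffs.length := by omega
  rw [List.getD_eq_getElem _ _ hylen]
  have hty : y < (coeffs.take H).length := by simp [List.length_take]; omega
  have := List.getElem_take (xs := coeffs) (j := H) (i := y) (h := hty)
  rw [← this]
  exact List.getElem_mem _

-- ===== VERDICT (by name: the statement is the Claim_ definition above) =====
theorem iwht_2d_spec : Claim_equal_iwht_2d := by
  intro coeffs w h_ _ hpre
  unfold Spec_iwht_2d iwht_2d iwht_2d_alt
  simp only [List.map_id_fun', id]
  by_cases hpos : 0 < h_
  · obtain ⟨hlen, hrows, hw⟩ := hpre hpos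
    have hHle : h_.toNat ≤ coeffs.length := by omega
    have hcolpass := pvFoldlCongP
      (fun r => r.length = coeffs.length ∧ ∀ p, (r.getD p []).length = (coeffs.getD p []).length)
      (fun r x => pvSetCol r h_.toNat x (pvIfwht (pvColOf r h_.toNat x)))
      (fun r x => pvSetCol r h_.toNat x (pvIfwhtRec (pvColOf r h_.toNat x)))
      (List.range w.toNat) coeffs ⟨rfl, fun _ => rfl⟩
      (by
        intro r x _ hP
        exact pvSetCol_P coeffs r h_.toNat x _ hP.1 hP.2)
      (by
        intro r x hx hP
        have hwpos : 0 < w := by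
          rw [List.mem_range] at hx
          omega
        obtain ⟨hHp2, _⟩ := hw hwpos
        show pvSetCol r h_.toNat x (pvIfwht (pvColOf r h_.toNat x)) =
          pvSetCol r h_.toNat x (pvIfwhtRec (pvColOf r h_.toNat x))
        rw [pvIfwht_eq _ (by rw [pvColOf_length]; exact hHp2)])
    rw [hcolpass.1]
    have hrowpass := pvFoldlCongP
      (fun r => r.length = coeffs.length ∧ ∀ p, (r.getD p []).length = (coeffs.getD p []).length)
      (fun r y => r.set y (pvIfwht (r.getD y [])))
      (fun r y => r.set y (pvIfwhtRec (r.getD y [])))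
      (List.range h_.toNat)
      (List.foldl (fun r x => pvSetCol r h_.toNat x (pvIfwhtRec (pvColOf r h_.toNat x)))
        coeffs (List.range w.toNat))
      (by
        have := hcolpass.2
        rw [hcolpass.1] at this
        exact this)
      (by
        intro r y _ hP
        exact pvSetRow_P coeffs r y _ hP.1 hP.2 (by rw [pvIfwht_length]; exact hP.2 y))
      (by
        intro r y hy hP
        have hyH : y < h_.toNat := List.mem_range.mp hy
        have hp2 : pvPow2Ok (r.getD y []).length = true := by
          rw [hP.2 y]
          exact hrows _ (pvMemTake coeffs h_.toNat y hyH hHle)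
        show r.set y (pvIfwht (r.getD y [])) = r.set y (pvIfwhtRec (r.getD y []))
        rw [pvIfwht_eq _ hp2])
    exact hrowpass.1
  · have hz : h_.toNat = 0 := by omega
    rw [hz]
    simp only [List.range_zero, List.foldl_nil]
    have hfun : ∀ (r : List (List Int)) (x : Nat),
        pvSetCol r 0 x (pvIfwht (pvColOf r 0 x)) = pvSetCol r 0 x (pvIfwhtRec (pvColOf r 0 x)) := by
      intro r x
      simp [pvSetCol]
    exact (pvFoldlCongP (fun _ => True) _ _ (List.range w.toNat) coeffs trivial
      (fun _ _ _ _ => trivial) (fun r x _ _ => hfun r x)).1
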